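-- pv_equiv track=rewrite | github.com/Roibos22/AoC25 | day_01/day_01.py | part_one
-- ===== SOURCE A (Python) =====
-- def part_one(lines):
--     res = 0
--     pos = 50
--
--     for line in lines:
--         if line[0] == 'L':
--             pos -= int(line[1:])
--         elif line[0] == 'R':
--             pos += int(line[1:])
--         pos = pos % 100
--         res += pos == 0
--
--     return(res)
-- ===== SOURCE B (Python) =====
-- def part_one(lines):
--     def delta(line):
--         if line[0] == 'L':
--             return -int(line[1:])
--         if line[0] == 'R':
--             return int(line[1:])
--         return 0
--
--     def solve(deltas, base):
--         # returns (number of prefix sums s of deltas with (50+base+s)%100==0, sum(deltas))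
--         if not deltas:
--             return (0, 0)
--         if len(deltas) == 1:
--             d = deltas[0]
--             return (int((50 + base + d) % 100 == 0), d)
--         k = len(deltas) // 2
--         c1, t1 = solve(deltas[:k], base)
--         c2, t2 = solve(deltas[k:], base + t1)
--         return (c1 + c2, t1 + t2)
--
--     return solve([delta(line) for line in lines], 0)[0]
-- ===== Notes on version B (the rewrite author's own statement) =====
-- stated objective: alternative
-- what changed: Replaces A's single stateful left-to-right loop (mutable position reduced mod 100 each step) by a divide-and-conquer recursion: map lines to signed deltas, then recursively split the delta list in half, each half returning (hit count, delta total), combining with the left total as the right half's base offset.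
import Mathlib
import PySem

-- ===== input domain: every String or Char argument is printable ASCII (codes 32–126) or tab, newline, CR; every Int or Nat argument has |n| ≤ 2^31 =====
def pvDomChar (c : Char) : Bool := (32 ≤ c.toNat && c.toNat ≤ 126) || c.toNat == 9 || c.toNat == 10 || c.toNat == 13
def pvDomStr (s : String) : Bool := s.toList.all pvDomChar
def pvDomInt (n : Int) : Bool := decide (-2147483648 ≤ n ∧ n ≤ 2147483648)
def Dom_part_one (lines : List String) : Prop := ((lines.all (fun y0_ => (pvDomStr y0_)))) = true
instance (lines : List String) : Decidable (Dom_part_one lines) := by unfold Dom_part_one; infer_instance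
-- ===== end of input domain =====

-- B replaces A's single stateful loop by a divide-and-conquer recursion over the delta list (alternative decomposition, same result).
-- ===== PORT A =====
-- one loop: mutable pos (reduced mod 100 each step) interleaved with counting
def part_one (lines : List String) : Int :=
  (lines.foldl (fun (st : Int × Int) line =>
      let cs := line.toList
      let pos :=
        if PySem.List.pyGetD cs 0 ' ' == 'L' then
          st.2 - (PySem.Int.ofChars? (PySem.List.slice cs (some 1) none)).getD 0
        else if PySem.List.pyGetD cs 0 ' ' == 'R' then
          st.2 + (PySem.Int.ofChars? (PySem.List.slice cs (some 1) none)).getD 0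
        else st.2
      let pos := PySem.Int.mod pos 100
      (st.1 + (if pos == 0 then 1 else 0), pos))
    (0, 50)).1

-- ===== PORT B =====
-- per-line signed delta (the helper `delta` in Source B)
def pvDelta (line : String) : Int :=
  let cs := line.toList
  if PySem.List.pyGetD cs 0 ' ' == 'L' then
    -((PySem.Int.ofChars? (PySem.List.slice cs (some 1) none)).getD 0)
  else if PySem.List.pyGetD cs 0 ' ' == 'R' then
    (PySem.Int.ofChars? (PySem.List.slice cs (some 1) none)).getD 0
  else 0

-- the helper `solve` in Source B: divide and conquer on the delta list;
-- returns (hits among the prefix sums given base offset, total of the deltas)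
def pvSolve : List Int → Int → Int × Int
  | [], _ => (0, 0)
  | [d], base => ((if PySem.Int.mod (50 + base + d) 100 == 0 then (1 : Int) else 0), d)
  | d1 :: d2 :: rest, base =>
    let ds := d1 :: d2 :: rest
    let k := ds.length / 2
    let r1 := pvSolve (ds.take k) base
    let r2 := pvSolve (ds.drop k) (base + r1.2)
    (r1.1 + r2.1, r1.2 + r2.2)
termination_by ds _ => ds.length
decreasing_by
  · simp [List.length_take]; omega
  · simp; omega

def part_one_alt (lines : List String) : Int :=
  (pvSolve (lines.map pvDelta) 0).1

-- ===== PRECONDITION & SPEC =====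
-- Pre_ excludes exactly the inputs where the Python A raises: an empty line (IndexError on
-- line[0]) or a line starting with 'L'/'R' whose remainder is not int()-parsable (ValueError).
def Pre_part_one (lines : List String) : Prop :=
  ∀ line ∈ lines, line.toList ≠ [] ∧
    ((PySem.List.pyGetD line.toList 0 ' ' = 'L' ∨ PySem.List.pyGetD line.toList 0 ' ' = 'R') →
      (PySem.Int.ofChars? (PySem.List.slice line.toList (some 1) none)).isSome)
instance (lines : List String) : Decidable (Pre_part_one lines) := by
  unfold Pre_part_one; infer_instance

def pvWitness_part_one : List String := (["L50", "R 7 ", "hold", "R+50"])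

def Spec_part_one (lines : List String) (out : Int) : Prop := out = part_one_alt lines
instance (lines : List String) (out : Int) : Decidable (Spec_part_one lines out) := by unfold Spec_part_one; infer_instance

-- ===== CLAIM (what is proved, stated in full; the proofs are below) =====
def Claim_equal_part_one : Prop := ∀ (lines : List String), Dom_part_one lines → Pre_part_one lines → Spec_part_one lines (part_one lines)

-- ===== LEMMAS AND PROOFS =====

-- the sequence of running prefix sums starting from acc (the initial acc itself not included)
def pvAccum (acc : Int) : List Int → List Int
  | [] => []
  | d :: ds => (acc + d) :: pvAccum (acc + d) ds

-- the invariant of A's loop: from position (50+acc) % 100 it counts exactly the prefix sums from acc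
lemma pv_loop_eq (lines : List String) : ∀ (res acc : Int),
    (lines.foldl (fun (st : Int × Int) line =>
        let cs := line.toList
        let pos :=
          if PySem.List.pyGetD cs 0 ' ' == 'L' then
            st.2 - (PySem.Int.ofChars? (PySem.List.slice cs (some 1) none)).getD 0
          else if PySem.List.pyGetD cs 0 ' ' == 'R' then
            st.2 + (PySem.Int.ofChars? (PySem.List.slice cs (some 1) none)).getD 0
          else st.2
        let pos := PySem.Int.mod pos 100
        (st.1 + (if pos == 0 then 1 else 0), pos))
      (res, PySem.Int.mod (50 + acc) 100)).1
    = res + ((pvAccum acc (lines.map pvDelta)).countP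
        (fun s => PySem.Int.mod (50 + s) 100 == 0) : Int) := by
  induction lines with
  | nil => intro res acc; simp [pvAccum]
  | cons l ls ih =>
    intro res acc
    have hd : ∀ pos : Int,
        (if PySem.List.pyGetD l.toList 0 ' ' == 'L' then
            pos - (PySem.Int.ofChars? (PySem.List.slice l.toList (some 1) none)).getD 0
          else if PySem.List.pyGetD l.toList 0 ' ' == 'R' then
            pos + (PySem.Int.ofChars? (PySem.List.slice l.toList (some 1) none)).getD 0
          else pos) = pos + pvDelta l := by
      intro pos; unfold pvDelta
      split_ifs with h1 h2
      · simp only [h1, if_true]; ring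
      · simp [h1, h2]
      · simp [h1, h2]
    have hmod : PySem.Int.mod (PySem.Int.mod (50 + acc) 100 + pvDelta l) 100
        = PySem.Int.mod (50 + (acc + pvDelta l)) 100 := by
      rw [PySem.Int.mod_eq_emod_of_pos (by norm_num), PySem.Int.mod_eq_emod_of_pos (by norm_num),
          PySem.Int.mod_eq_emod_of_pos (by norm_num), Int.emod_add_emod]
      ring_nf
    simp only [List.foldl_cons, List.map_cons, pvAccum, List.countP_cons, hd, hmod]
    rw [ih (res + _) (acc + pvDelta l)]
    by_cases h : PySem.Int.mod (50 + (acc + pvDelta l)) 100 = 0 <;>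
      simp <;> ring

-- prefix sums split at any point: the right part starts from the left part's total
lemma pvAccum_append (xs : List Int) : ∀ (ys : List Int) (a : Int),
    pvAccum a (xs ++ ys) = pvAccum a xs ++ pvAccum (a + xs.sum) ys := by
  induction xs with
  | nil => intro ys a; simp [pvAccum]
  | cons d xs ih =>
    intro ys a
    simp only [List.cons_append, pvAccum, ih, List.sum_cons]
    rw [add_assoc]

-- the divide-and-conquer recursion computes the prefix-sum hit count and the total
lemma pvSolve_spec_aux : ∀ (n : Nat) (ds : List Int), ds.length ≤ n → ∀ (base : Int),
    pvSolve ds base =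
      (((pvAccum base ds).countP (fun s => PySem.Int.mod (50 + s) 100 == 0) : Int), ds.sum) := by
  intro n
  induction n with
  | zero =>
    intro ds h base
    have hds : ds = [] := by cases ds <;> simp_all
    subst hds; simp [pvSolve, pvAccum]
  | succ n ih =>
    intro ds h base
    match ds with
    | [] => simp [pvSolve, pvAccum]
    | [d] =>
      simp only [pvSolve, pvAccum, List.countP_cons, List.countP_nil, List.sum_cons,
        List.sum_nil, add_zero]
      have hassoc : 50 + base + d = 50 + (base + d) := by ring
      rw [hassoc]
      simp
    | d1 :: d2 :: rest =>
      rw [pvSolve]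
      have hlen : (d1 :: d2 :: rest).length = rest.length + 2 := by simp
      have h1 : (List.take ((d1 :: d2 :: rest).length / 2) (d1 :: d2 :: rest)).length ≤ n := by
        simp only [List.length_take, hlen] at *; omega
      have h2 : (List.drop ((d1 :: d2 :: rest).length / 2) (d1 :: d2 :: rest)).length ≤ n := by
        simp only [List.length_drop, hlen] at *; omega
      rw [ih _ h1 base, ih _ h2]
      have hsplit := List.take_append_drop ((d1 :: d2 :: rest).length / 2) (d1 :: d2 :: rest)
      conv_rhs => rw [← hsplit]
      rw [pvAccum_append, List.countP_append, List.sum_append]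
      push_cast
      rfl

lemma pvSolve_spec (ds : List Int) (base : Int) :
    pvSolve ds base =
      (((pvAccum base ds).countP (fun s => PySem.Int.mod (50 + s) 100 == 0) : Int), ds.sum) :=
  pvSolve_spec_aux ds.length ds le_rfl base

-- ===== VERDICT (by name: the statement is the Claim_ definition above) =====
theorem part_one_spec : Claim_equal_part_one := by
  intro lines _ _
  unfold Spec_part_one part_one part_one_alt
  have h50 : (50 : Int) = PySem.Int.mod (50 + 0) 100 := by decide
  rw [h50, pv_loop_eq lines 0 0, pvSolve_spec]
  simp
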